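-- pv_equiv track=rewrite | github.com/Abenezer1244/Lumitrade | backend/scripts/audits/track4_cycle_scan.py | find_short_cycles
-- ===== SOURCE A (Python) =====
-- def find_short_cycles(graph: dict[str, set[str]], scc: list[str]) -> list[list[str]]:
--     """Within an SCC, enumerate simple cycles up to length 6 for reporting."""
--     members = set(scc)
--     cycles: list[list[str]] = []
--     seen: set[tuple[str, ...]] = set()
--     LIMIT = 6
--
--     def dfs(start: str, current: str, path: list[str]) -> None:
--         if len(path) > LIMIT:
--             return
--         for nxt in graph.get(current, ()):
--             if nxt not in members:
--                 continue
--             if nxt == start and len(path) >= 1: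
--                 # Found a cycle
--                 norm = tuple(path)
--                 # rotation-canonical
--                 k = norm.index(min(norm))
--                 rot = norm[k:] + norm[:k]
--                 if rot not in seen:
--                     seen.add(rot)
--                     cycles.append(list(norm) + [start])
--             elif nxt not in path:
--                 dfs(start, nxt, path + [nxt])
--
--     if len(scc) <= 12:
--         for v in scc:
--             dfs(v, v, [v])
--     return cycles
-- ===== SOURCE B (Python) =====
-- def find_short_cycles(graph: dict[str, set[str]], scc: list[str]) -> list[list[str]]:
--     """Within an SCC, enumerate simple cycles up to length 6 for reporting.
--
--     Iterative DFS with an explicit stack of (start, current, path, neighbor-iterator)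
--     frames instead of recursion; identical output (same cycles, same order).
--     """
--     members = set(scc)
--     cycles: list[list[str]] = []
--     seen: set[tuple[str, ...]] = set()
--     LIMIT = 6
--
--     if len(scc) > 12:
--         return cycles
--
--     for v in scc:
--         stack = [(v, v, [v], iter(graph.get(v, ())))]
--         while stack:
--             start, cur, path, it = stack[-1]
--             nxt = next(it, None)
--             if nxt is None:
--                 stack.pop()
--                 continue
--             if nxt not in members:
--                 continue
--             if nxt == start:
--                 norm = tuple(path)
--                 k = norm.index(min(norm))
--                 rot = norm[k:] + norm[:k]
--                 if rot not in seen: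
--                     seen.add(rot)
--                     cycles.append(list(norm) + [start])
--             elif nxt not in path and len(path) < LIMIT:
--                 stack.append((start, nxt, path + [nxt], iter(graph.get(nxt, ()))))
--     return cycles
-- ===== Notes on version B (the rewrite author's own statement) =====
-- stated objective: alternative
-- what changed: The recursive DFS (nested closure calling itself per neighbour) is replaced by an iterative DFS over an explicit stack of (start, current, path, remaining-neighbour-iterator) frames that interleaves recording and descent exactly as the call stack does.
import Mathlib
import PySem

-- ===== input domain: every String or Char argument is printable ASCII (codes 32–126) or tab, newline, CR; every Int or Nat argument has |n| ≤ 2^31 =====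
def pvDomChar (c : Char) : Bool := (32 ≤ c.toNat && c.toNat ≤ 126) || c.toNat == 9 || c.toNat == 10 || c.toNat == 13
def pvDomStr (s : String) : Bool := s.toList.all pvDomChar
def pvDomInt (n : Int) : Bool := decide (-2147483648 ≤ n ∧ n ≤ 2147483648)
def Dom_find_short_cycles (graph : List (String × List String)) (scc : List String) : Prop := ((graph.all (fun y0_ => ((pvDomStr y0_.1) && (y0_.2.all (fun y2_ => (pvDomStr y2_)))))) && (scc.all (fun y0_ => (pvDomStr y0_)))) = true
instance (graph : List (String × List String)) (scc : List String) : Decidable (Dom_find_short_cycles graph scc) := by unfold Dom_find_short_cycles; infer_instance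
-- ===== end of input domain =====

-- B replaces A's recursive DFS by an iterative DFS over an explicit stack of
-- (start, current, path, remaining-neighbours) frames (same output, same order);
-- objective: alternative decomposition, no speed claim.

-- ===== PORT A =====
-- graph.get(k, ()) — the association-list argument read as a Python dict
def pvAdjOf (g : List (String × List String)) (k : String) : List String :=
  PySem.Dict.getD (PySem.Dict.mk g) k []

-- shared cycle-recording step (identical lines in both Pythons):
-- norm = tuple(path); k = norm.index(min(norm)); rot = norm[k:] + norm[:k];
-- if rot not in seen: seen.add(rot); cycles.append(list(norm) + [start])
def pvRecordCycle (path : List String) (start : String)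
    (σ : List (List String) × List (List String)) :
    List (List String) × List (List String) :=
  match PySem.List.min? path (fun x => x) with
  | none => σ  -- unreachable: path is never empty
  | some m =>
    let k : Nat := (PySem.List.index? path m).getD 0
    let rot := PySem.List.slice path (some (k : Int)) none ++
               PySem.List.slice path none (some (k : Int))
    if rot ∈ σ.2 then σ
    else (σ.1 ++ [path ++ [start]], PySem.Set.add σ.2 rot)

-- A's recursive dfs: dfsA is the function body (entry length guard), loopA its
-- `for nxt in graph.get(current, ())` loop.  The proof argument h only carries
-- the entry guard (len(path) ≤ LIMIT) to the termination measure.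
mutual
def dfsA (g : List (String × List String)) (members : List String)
    (start cur : String) (path : List String)
    (σ : List (List String) × List (List String)) :
    List (List String) × List (List String) :=
  if h : 6 < path.length then σ
  else loopA g members start cur path (Nat.le_of_not_lt h) (pvAdjOf g cur) σ
  termination_by ((8 - path.length, 1, 0) : Nat × Nat × Nat)

def loopA (g : List (String × List String)) (members : List String)
    (start cur : String) (path : List String) (h : path.length ≤ 6)
    (ns : List String) (σ : List (List String) × List (List String)) :
    List (List String) × List (List String) :=
  match ns with
  | [] => σ
  | nxt :: rest =>
    if nxt ∉ members then loopA g members start cur path h rest σ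
    else if nxt = start ∧ 1 ≤ path.length then
      loopA g members start cur path h rest (pvRecordCycle path start σ)
    else if nxt ∉ path then
      loopA g members start cur path h rest (dfsA g members start nxt (path ++ [nxt]) σ)
    else loopA g members start cur path h rest σ
  termination_by ((8 - path.length, 0, ns.length) : Nat × Nat × Nat)
end

def find_short_cycles (graph : List (String × List String)) (scc : List String) :
    List (List String) :=
  let members := PySem.Set.ofList scc
  if scc.length ≤ 12 then
    (scc.foldl (fun σ v => dfsA graph members v v [v] σ) ([], [])).1
  else []

-- ===== PORT B =====
-- termination machinery for the stack machine: potential of a frame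
def pvMaxAdj (g : List (String × List String)) : Nat :=
  g.foldl (fun m p => max m p.2.length) 0

def pvK (g : List (String × List String)) : Nat := pvMaxAdj g + 2

def pvPhi (g : List (String × List String))
    (f : String × String × List String × List String) : Nat :=
  (1 + f.2.2.2.length) * pvK g ^ (8 - f.2.2.1.length)

def pvMu (g : List (String × List String))
    (stack : List (String × String × List String × List String)) : Nat :=
  (stack.map (pvPhi g)).sum

lemma pvMaxAdj_bound (g : List (String × List String)) :
    ∀ p ∈ g, p.2.length ≤ pvMaxAdj g :=
  (PySem.List.le_foldl_max_nat g (fun p => p.2.length) 0).2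

lemma pvGet_mem (g : List (String × List String)) (k : String) (v : List String)
    (hv : (PySem.Dict.mk g).get? k = some v) : ∃ p ∈ g, p.2 = v := by
  induction g with
  | nil => simp [PySem.Dict.get?] at hv
  | cons q t iht =>
    rw [PySem.Dict.get?_mk_cons] at hv
    by_cases hk : q.1 == k
    · simp [hk] at hv
      exact ⟨q, List.mem_cons_self, hv⟩
    · simp [hk] at hv
      obtain ⟨p, hp, hpv⟩ := iht hv
      exact ⟨p, List.mem_cons_of_mem _ hp, hpv⟩

lemma pvAdj_le (g : List (String × List String)) (k : String) :
    (pvAdjOf g k).length ≤ pvMaxAdj g := by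
  unfold pvAdjOf PySem.Dict.getD
  cases hv : (PySem.Dict.mk g).get? k with
  | none => simp
  | some v =>
    obtain ⟨p, hp, hpv⟩ := pvGet_mem g k v hv
    simpa [hpv] using pvMaxAdj_bound g p hp

lemma pvPhi_pos (g : List (String × List String))
    (f : String × String × List String × List String) : 0 < pvPhi g f := by
  unfold pvPhi
  exact Nat.mul_pos (by omega) (Nat.pow_pos (by unfold pvK; omega))

lemma pvConsume_lt (g : List (String × List String)) (s c nxt : String)
    (p ns : List String) :
    pvPhi g (s, c, p, ns) < pvPhi g (s, c, p, nxt :: ns) := by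
  unfold pvPhi
  simp only [List.length_cons]
  have hX : 0 < pvK g ^ (8 - p.length) := Nat.pow_pos (by unfold pvK; omega)
  nlinarith [hX]

lemma pvPush_lt (g : List (String × List String)) (s c nxt : String)
    (p ns : List String) (hL : p.length < 6) :
    pvPhi g (s, nxt, p ++ [nxt], pvAdjOf g nxt) + pvPhi g (s, c, p, ns)
      < pvPhi g (s, c, p, nxt :: ns) := by
  have hA := pvAdj_le g nxt
  unfold pvPhi
  have hl1 : (p ++ [nxt]).length = p.length + 1 := by simp
  simp only [List.length_cons, hl1]
  have h87 : 8 - (p.length + 1) = 7 - p.length := by omega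
  have h8 : 8 - p.length = (7 - p.length) + 1 := by omega
  rw [h87, h8, pow_succ]
  have hXpos : 0 < pvK g ^ (7 - p.length) := Nat.pow_pos (by unfold pvK; omega)
  have hKA : 1 + (pvAdjOf g nxt).length < pvK g := by unfold pvK; omega
  have key : (1 + (pvAdjOf g nxt).length) * pvK g ^ (7 - p.length)
      < pvK g ^ (7 - p.length) * pvK g := by
    rw [mul_comm (pvK g ^ (7 - p.length)) (pvK g)]
    exact (Nat.mul_lt_mul_right hXpos).mpr hKA
  nlinarith [key, hXpos]

lemma pvMu_cons (g : List (String × List String))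
    (f : String × String × List String × List String)
    (fs : List (String × String × List String × List String)) :
    pvMu g (f :: fs) = pvPhi g f + pvMu g fs := by
  simp [pvMu]

-- B's while-loop over the explicit stack; one call = one iteration
-- (advance the top frame's neighbour iterator by one).
def runM (g : List (String × List String)) (members : List String) :
    List (String × String × List String × List String) →
    (List (List String) × List (List String)) →
    List (List String) × List (List String)
  | [], σ => σ
  | (_start, _cur, _path, []) :: fs, σ => runM g members fs σ
  | (start, cur, path, nxt :: rest) :: fs, σ =>
    if nxt ∉ members then runM g members ((start, cur, path, rest) :: fs) σ
    else if nxt = start then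
      runM g members ((start, cur, path, rest) :: fs) (pvRecordCycle path start σ)
    else if h : nxt ∉ path ∧ path.length < 6 then
      runM g members
        ((start, nxt, path ++ [nxt], pvAdjOf g nxt) ::
          (start, cur, path, rest) :: fs) σ
    else runM g members ((start, cur, path, rest) :: fs) σ
  termination_by stack _ => pvMu g stack
  decreasing_by
  · rw [pvMu_cons]; have := pvPhi_pos g (_start, _cur, _path, []); omega
  · rw [pvMu_cons, pvMu_cons]
    have := pvConsume_lt g start cur nxt path rest; omega
  · rw [pvMu_cons, pvMu_cons]
    have := pvConsume_lt g start cur nxt path rest; omega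
  · rw [pvMu_cons, pvMu_cons, pvMu_cons]
    have := pvPush_lt g start cur nxt path rest h.2; omega
  · rw [pvMu_cons, pvMu_cons]
    have := pvConsume_lt g start cur nxt path rest; omega

def find_short_cycles_alt (graph : List (String × List String)) (scc : List String) :
    List (List String) :=
  let members := PySem.Set.ofList scc
  if scc.length ≤ 12 then
    (scc.foldl
      (fun σ v => runM graph members [(v, v, [v], pvAdjOf graph v)] σ)
      ([], [])).1
  else []

-- ===== PRECONDITION & SPEC =====
def Spec_find_short_cycles (graph : List (String × List String)) (scc : List String) (out : List (List String)) : Prop := out = find_short_cycles_alt graph scc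
instance (graph : List (String × List String)) (scc : List String) (out : List (List String)) : Decidable (Spec_find_short_cycles graph scc out) := by unfold Spec_find_short_cycles; infer_instance

-- ===== CLAIM (what is proved, stated in full; the proofs are below) =====
def Claim_equal_find_short_cycles : Prop := ∀ (graph : List (String × List String)) (scc : List String), Dom_find_short_cycles graph scc → Spec_find_short_cycles graph scc (find_short_cycles graph scc)

-- ===== LEMMAS AND PROOFS =====

-- one-step equations for the stack machine
lemma runM_skip (g : List (String × List String)) (members : List String)
    (s c nxt : String) (p rest : List String) (fs : List _) (σ : _)
    (hm : nxt ∉ members) :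
    runM g members ((s, c, p, nxt :: rest) :: fs) σ =
      runM g members ((s, c, p, rest) :: fs) σ := by
  simp only [runM]; rw [if_pos hm]

lemma runM_rec (g : List (String × List String)) (members : List String)
    (s c nxt : String) (p rest : List String) (fs : List _) (σ : _)
    (hm : nxt ∈ members) (hs : nxt = s) :
    runM g members ((s, c, p, nxt :: rest) :: fs) σ =
      runM g members ((s, c, p, rest) :: fs) (pvRecordCycle p s σ) := by
  simp only [runM]; rw [if_neg (not_not.mpr hm), if_pos hs]

lemma runM_push (g : List (String × List String)) (members : List String)
    (s c nxt : String) (p rest : List String) (fs : List _) (σ : _)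
    (hm : nxt ∈ members) (hs : nxt ≠ s) (hcond : nxt ∉ p ∧ p.length < 6) :
    runM g members ((s, c, p, nxt :: rest) :: fs) σ =
      runM g members
        ((s, nxt, p ++ [nxt], pvAdjOf g nxt) :: (s, c, p, rest) :: fs) σ := by
  simp only [runM]; rw [if_neg (not_not.mpr hm), if_neg hs, dif_pos hcond]

lemma runM_noPush (g : List (String × List String)) (members : List String)
    (s c nxt : String) (p rest : List String) (fs : List _) (σ : _)
    (hm : nxt ∈ members) (hs : nxt ≠ s) (hcond : ¬ (nxt ∉ p ∧ p.length < 6)) :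
    runM g members ((s, c, p, nxt :: rest) :: fs) σ =
      runM g members ((s, c, p, rest) :: fs) σ := by
  simp only [runM]; rw [if_neg (not_not.mpr hm), if_neg hs, dif_neg hcond]

-- one-step equations for A's neighbour loop
lemma loopA_skip (g : List (String × List String)) (members : List String)
    (s c nxt : String) (p : List String) (h : p.length ≤ 6) (rest : List String)
    (σ : _) (hm : nxt ∉ members) :
    loopA g members s c p h (nxt :: rest) σ = loopA g members s c p h rest σ := by
  simp only [loopA]; rw [if_pos hm]

lemma loopA_rec (g : List (String × List String)) (members : List String)
    (s c nxt : String) (p : List String) (h : p.length ≤ 6) (rest : List String)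
    (σ : _) (hm : nxt ∈ members) (hs : nxt = s) (hp : 1 ≤ p.length) :
    loopA g members s c p h (nxt :: rest) σ =
      loopA g members s c p h rest (pvRecordCycle p s σ) := by
  simp only [loopA]; rw [if_neg (not_not.mpr hm), if_pos ⟨hs, hp⟩]

lemma loopA_desc (g : List (String × List String)) (members : List String)
    (s c nxt : String) (p : List String) (h : p.length ≤ 6) (rest : List String)
    (σ : _) (hm : nxt ∈ members) (hs : ¬ (nxt = s ∧ 1 ≤ p.length)) (hpath : nxt ∉ p) :
    loopA g members s c p h (nxt :: rest) σ =
      loopA g members s c p h rest (dfsA g members s nxt (p ++ [nxt]) σ) := by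
  simp only [loopA]; rw [if_neg (not_not.mpr hm), if_neg hs, if_pos hpath]

lemma loopA_skip2 (g : List (String × List String)) (members : List String)
    (s c nxt : String) (p : List String) (h : p.length ≤ 6) (rest : List String)
    (σ : _) (hm : nxt ∈ members) (hs : ¬ (nxt = s ∧ 1 ≤ p.length)) (hpath : nxt ∈ p) :
    loopA g members s c p h (nxt :: rest) σ = loopA g members s c p h rest σ := by
  simp only [loopA]
  rw [if_neg (not_not.mpr hm), if_neg hs, if_neg (not_not.mpr hpath)]

-- the simulation: running the machine with a frame on top of the stack is
-- running A's neighbour loop on that frame and then the rest of the stack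
lemma pvSim (g : List (String × List String)) (members : List String) :
    ∀ (N : Nat) (fs : List (String × String × List String × List String))
      (s c : String) (p : List String) (hp : 1 ≤ p.length) (h : p.length ≤ 6)
      (ns : List String) (σ : List (List String) × List (List String)),
      pvMu g ((s, c, p, ns) :: fs) ≤ N →
      runM g members ((s, c, p, ns) :: fs) σ =
        runM g members fs (loopA g members s c p h ns σ) := by
  intro N
  induction N with
  | zero =>
    intro fs s c p hp h ns σ hmu
    exfalso
    have := pvPhi_pos g (s, c, p, ns)
    simp only [pvMu_cons] at hmu
    omega
  | succ N ih =>
    intro fs s c p hp h ns σ hmu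
    cases ns with
    | nil => simp only [runM, loopA]
    | cons nxt rest =>
      have hcons : pvMu g ((s, c, p, rest) :: fs) ≤ N := by
        have := pvConsume_lt g s c nxt p rest
        simp only [pvMu_cons] at hmu ⊢
        omega
      by_cases hm : nxt ∈ members
      · by_cases hs : nxt = s
        · -- record a cycle, then continue with the same frame
          rw [runM_rec g members s c nxt p rest fs σ hm hs,
            loopA_rec g members s c nxt p h rest σ hm hs hp]
          exact ih fs s c p hp h rest (pvRecordCycle p s σ) hcons
        · by_cases hpath : nxt ∈ p
          · -- neighbour already on the path: both sides skip it
            rw [runM_noPush g members s c nxt p rest fs σ hm hs (by simp [hpath]),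
              loopA_skip2 g members s c nxt p h rest σ hm (by simp [hs]) hpath]
            exact ih fs s c p hp h rest σ hcons
          · by_cases hlen : p.length < 6
            · -- descend: the pushed frame is A's recursive call
              have hpush : pvMu g ((s, nxt, p ++ [nxt], pvAdjOf g nxt) ::
                  (s, c, p, rest) :: fs) ≤ N := by
                have := pvPush_lt g s c nxt p rest hlen
                simp only [pvMu_cons] at hmu ⊢
                omega
              have hp' : 1 ≤ (p ++ [nxt]).length := by simp
              have h' : (p ++ [nxt]).length ≤ 6 := by simp; omega
              rw [runM_push g members s c nxt p rest fs σ hm hs ⟨hpath, hlen⟩]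
              rw [ih ((s, c, p, rest) :: fs) s nxt (p ++ [nxt]) hp' h'
                (pvAdjOf g nxt) σ hpush]
              rw [ih fs s c p hp h rest _ hcons]
              rw [loopA_desc g members s c nxt p h rest σ hm (by simp [hs]) hpath]
              have hd : dfsA g members s nxt (p ++ [nxt]) σ =
                  loopA g members s nxt (p ++ [nxt]) h' (pvAdjOf g nxt) σ := by
                rw [dfsA]
                rw [dif_neg (by simp; omega)]
              rw [hd]
            · -- path already at the length limit: A's child call does nothing
              have hL : p.length = 6 := by omega
              have hd : dfsA g members s nxt (p ++ [nxt]) σ = σ := by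
                rw [dfsA]
                rw [dif_pos (by simp [hL])]
              rw [runM_noPush g members s c nxt p rest fs σ hm hs (by simp [hlen]),
                loopA_desc g members s c nxt p h rest σ hm (by simp [hs]) hpath, hd]
              exact ih fs s c p hp h rest σ hcons
      · -- neighbour outside the SCC: both sides skip it
        rw [runM_skip g members s c nxt p rest fs σ hm,
          loopA_skip g members s c nxt p h rest σ hm]
        exact ih fs s c p hp h rest σ hcons

lemma pvStart (g : List (String × List String)) (members : List String)
    (v : String) (σ : List (List String) × List (List String)) :
    runM g members [(v, v, [v], pvAdjOf g v)] σ = dfsA g members v v [v] σ := by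
  have h1 : (1 : Nat) ≤ [v].length := by simp
  have h6 : [v].length ≤ 6 := by simp
  rw [pvSim g members (pvMu g [(v, v, [v], pvAdjOf g v)]) [] v v [v] h1 h6
    (pvAdjOf g v) σ (le_refl _)]
  rw [dfsA]
  rw [dif_neg (by simp)]
  simp only [runM]

-- ===== VERDICT (by name: the statement is the Claim_ definition above) =====
theorem find_short_cycles_spec : Claim_equal_find_short_cycles := by
  intro graph scc _
  unfold Spec_find_short_cycles find_short_cycles find_short_cycles_alt
  simp only
  split_ifs with hlen
  · congr 1
    apply PySem.List.foldl_congr_mem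
    intro σ v _
    exact (pvStart graph (PySem.Set.ofList scc) v σ).symm
  · rfl
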